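-- pv_equiv track=rewrite | github.com/ClericPy/ezrequests | torequests/utils.py | split_seconds
-- ===== SOURCE A (Python) =====
-- def split_seconds(seconds):
--     """Split seconds into [day, hour, minute, second, ms]
--
--         `divisor: 1, 24, 60, 60, 1000`
--
--         `units: day, hour, minute, second, ms`
--
--     >>> split_seconds(6666666)
--     [77, 3, 51, 6, 0]
--     """
--     ms = seconds * 1000
--     divisors = (1, 24, 60, 60, 1000)
--     quotient, result = ms, []
--     for divisor in divisors[::-1]:
--         quotient, remainder = divmod(quotient, divisor)
--         result.append(quotient) if divisor == 1 else result.append(remainder)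
--     return result[::-1]
-- ===== SOURCE B (Python) =====
-- def split_seconds(seconds):
--     ms = seconds * 1000
--     return [ms // 86400000, ms // 3600000 % 24, ms // 60000 % 60,
--             ms // 1000 % 60, ms % 1000]
-- ===== Notes on version B (the rewrite author's own statement) =====
-- stated objective: idiomatic
-- what changed: Replaces the reversed divmod loop threading a quotient and a final list reversal with a direct closed-form list where each unit is an independent floor-division/modulo of the total milliseconds.
import Mathlib
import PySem

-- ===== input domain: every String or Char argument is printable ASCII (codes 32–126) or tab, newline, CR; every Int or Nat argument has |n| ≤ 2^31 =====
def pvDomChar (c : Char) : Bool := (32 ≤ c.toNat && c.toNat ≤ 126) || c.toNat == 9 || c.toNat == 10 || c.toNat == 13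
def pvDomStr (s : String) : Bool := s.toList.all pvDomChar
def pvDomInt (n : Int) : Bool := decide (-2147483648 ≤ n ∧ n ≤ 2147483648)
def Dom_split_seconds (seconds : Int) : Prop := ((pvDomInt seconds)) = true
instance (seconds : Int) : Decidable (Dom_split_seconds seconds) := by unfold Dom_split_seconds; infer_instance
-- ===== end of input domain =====

-- B replaces A's reversed divmod loop and final reversal with a direct closed-form list
-- of independent floor-division/modulo expressions on the total milliseconds (idiomatic).


-- ===== PORT A =====
-- `for divisor in divisors[::-1]: quotient, remainder = divmod(quotient, divisor); result.append(...)`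
def split_seconds (seconds : Int) : List Int :=
  let ms := seconds * 1000
  let step := fun (st : Int × List Int) (divisor : Int) =>
    let q := PySem.Int.floordiv st.1 divisor
    let r := PySem.Int.mod st.1 divisor
    (q, if divisor == 1 then st.2 ++ [q] else st.2 ++ [r])
  let res := ((PySem.List.slice? ([(1:Int),24,60,60,1000]) none none (-1)).getD []).foldl step (ms, [])
  (PySem.List.slice? res.2 none none (-1)).getD []

-- ===== PORT B =====
def split_seconds_alt (seconds : Int) : List Int :=
  let ms := seconds * 1000
  [PySem.Int.floordiv ms 86400000,
   PySem.Int.mod (PySem.Int.floordiv ms 3600000) 24,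
   PySem.Int.mod (PySem.Int.floordiv ms 60000) 60,
   PySem.Int.mod (PySem.Int.floordiv ms 1000) 60,
   PySem.Int.mod ms 1000]

-- ===== PRECONDITION & SPEC =====
def Spec_split_seconds (seconds : Int) (out : List Int) : Prop := out = split_seconds_alt seconds
instance (seconds : Int) (out : List Int) : Decidable (Spec_split_seconds seconds out) := by unfold Spec_split_seconds; infer_instance

-- ===== CLAIM (what is proved, stated in full; the proofs are below) =====
def Claim_equal_split_seconds : Prop := ∀ (seconds : Int), Dom_split_seconds seconds → Spec_split_seconds seconds (split_seconds seconds)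

-- ===== LEMMAS AND PROOFS =====

-- ===== VERDICT (by name: the statement is the Claim_ definition above) =====
theorem split_seconds_spec : Claim_equal_split_seconds := by
  intro s _
  unfold Spec_split_seconds split_seconds split_seconds_alt
  simp only [PySem.List.slice?_none_none_neg_one, Option.getD_some, List.foldl]
  norm_num [PySem.Int.floordiv_eq_ediv_of_pos, PySem.Int.mod_eq_emod_of_pos]
  omega
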